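-- pv_equiv track=rewrite | github.com/TimefoldAI/timefold-solver | python/jpyinterpreter/src/main/python/conversions.py | is_banned_module
-- ===== SOURCE A (Python) =====
-- def is_banned_module(module: str):
--     banned_modules = {'jpype', 'importlib', 'builtins'}
--     for banned_module in banned_modules:
--         if module == banned_module:
--             return True
--         elif module == f'_{banned_module}':
--             return True
--         elif module.startswith(f'{banned_module}.'):
--             return True
--         elif module.startswith(f'_{banned_module}.'):
--             return True
--     return False
-- ===== SOURCE B (Python) =====
-- def is_banned_module(module: str):
--     banned_modules = {'jpype', 'importlib', 'builtins'}
--     dot = module.find('.')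
--     head = module if dot < 0 else module[:dot]
--     if head.startswith('_'):
--         head = head[1:]
--     return head in banned_modules
-- ===== Notes on version B (the rewrite author's own statement) =====
-- stated objective: simpler
-- what changed: B replaces A's loop over the banned set with four equality/startswith checks each by a single computation: find the first dotted component, strip one leading underscore, and test set membership once.
import Mathlib
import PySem

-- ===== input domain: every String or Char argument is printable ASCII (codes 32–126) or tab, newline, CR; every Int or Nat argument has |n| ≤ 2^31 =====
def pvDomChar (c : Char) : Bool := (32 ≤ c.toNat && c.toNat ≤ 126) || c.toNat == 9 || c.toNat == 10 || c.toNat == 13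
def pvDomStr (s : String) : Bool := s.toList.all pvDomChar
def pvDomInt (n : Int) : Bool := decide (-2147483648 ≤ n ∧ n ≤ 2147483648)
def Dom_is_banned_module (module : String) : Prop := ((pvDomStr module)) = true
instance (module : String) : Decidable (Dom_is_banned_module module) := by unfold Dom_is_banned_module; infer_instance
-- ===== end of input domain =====

-- B is a different decomposition of the same check: one split at the first dot plus one
-- underscore strip plus one membership test, instead of A's loop of four tests per banned module.

-- ===== PORT A =====
-- the Python set literal {'jpype','importlib','builtins'}: iteration order is hash-dependent,
-- but the loop body only ever returns True, so the result is order-independent; ported in literal order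
def pvBannedA : List String := ["jpype", "importlib", "builtins"]

-- one pass of the loop body: the elif chain of 'return True's is a disjunction
def pvCheckA (module b : String) : Bool :=
  module == b || module == "_" ++ b ||
  PySem.Str.startswith module (b ++ ".") || PySem.Str.startswith module ("_" ++ b ++ ".")

def pvLoopA (module : String) : List String → Bool
  | [] => false
  | b :: rest => pvCheckA module b || pvLoopA module rest

def is_banned_module (module : String) : Bool := pvLoopA module pvBannedA

-- ===== PORT B =====
-- module.find('.'), module[:dot], head[1:] via PySem; 'head in banned_modules' is membership
-- among the distinct elements of the set literal
def is_banned_module_alt (module : String) : Bool :=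
  let dot := PySem.Str.find module "."
  let head := if dot < 0 then module else PySem.Str.slice module none (some dot)
  let head := if PySem.Str.startswith head "_" then PySem.Str.slice head (some 1) none else head
  (PySem.Set.ofList ["jpype", "importlib", "builtins"]).contains head

-- ===== PRECONDITION & SPEC =====
def Spec_is_banned_module (module : String) (out : Bool) : Prop := out = is_banned_module_alt module
instance (module : String) (out : Bool) : Decidable (Spec_is_banned_module module out) := by unfold Spec_is_banned_module; infer_instance

-- ===== CLAIM (what is proved, stated in full; the proofs are below) =====
def Claim_equal_is_banned_module : Prop := ∀ (module : String), Dom_is_banned_module module → Spec_is_banned_module module (is_banned_module module)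

-- ===== LEMMAS AND PROOFS =====

-- [c] is a prefix of m iff m starts with c
lemma pv_singleton_prefix_iff (c : Char) (m : List Char) : [c] <+: m ↔ m.head? = some c := by
  cases m with
  | nil => simp
  | cons a t => simp [List.cons_prefix_cons, eq_comm]

-- if position k holds the first '.', takeWhile (≠ '.') is take k
lemma pv_takeWhile_eq_take (l : List Char) (k : Nat)
    (hk : l[k]? = some '.') (hmin : ∀ i < k, l[i]? ≠ some '.') :
    l.takeWhile (· != '.') = l.take k := by
  induction l generalizing k with
  | nil => simp at hk
  | cons a t ih =>
    cases k with
    | zero => simp at hk; simp [List.takeWhile_cons, hk]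
    | succ k =>
      have h0 : a ≠ '.' := by
        have := hmin 0 (Nat.succ_pos k); simpa using this
      simp only [List.getElem?_cons_succ] at hk
      have : t.takeWhile (· != '.') = t.take k :=
        ih k hk (fun i hi => by
          have := hmin (i + 1) (Nat.succ_lt_succ hi); simpa using this)
      simp [List.takeWhile_cons, h0, this]

-- the find-based first component equals takeWhile (≠ '.')
lemma pv_head_eq_takeWhile (l : List Char) :
    (if PySem.Chars.find l ['.'] < 0 then l else l.take (PySem.Chars.find l ['.']).toNat)
      = l.takeWhile (· != '.') := by
  by_cases h : PySem.Chars.find l ['.'] < 0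
  · have hne : PySem.Chars.find l ['.'] = -1 := by
      have := PySem.Chars.neg_one_le_find l ['.']
      omega
    have hnotin : ¬ ['.'] <:+: l := (PySem.Chars.find_eq_neg_one_iff l ['.']).mp hne
    have : ∀ x ∈ l, (x != '.') = true := by
      intro x hx
      have : x ≠ '.' := by
        intro hx'; exact hnotin ((List.singleton_infix_iff '.' l).mpr (hx' ▸ hx))
      simpa using this
    simp [h, (List.takeWhile_eq_self_iff).mpr this]
  · have hge : 0 ≤ PySem.Chars.find l ['.'] := by omega
    obtain ⟨hpre, hminp⟩ := PySem.Chars.find_spec hge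
    have hk : l[(PySem.Chars.find l ['.']).toNat]? = some '.' := by
      have := (pv_singleton_prefix_iff '.' _).mp hpre
      simpa [List.head?_drop] using this
    have hmin : ∀ i < (PySem.Chars.find l ['.']).toNat, l[i]? ≠ some '.' := by
      intro i hi hsome
      exact hminp i hi ((pv_singleton_prefix_iff '.' _).mpr (by simpa [List.head?_drop] using hsome))
    simp [h, pv_takeWhile_eq_take l _ hk hmin]

-- A's per-module pair of checks characterised by the first dotted component
lemma pv_comp_iff (l : List Char) : ∀ (b : List Char), '.' ∉ b →
    ((l = b ∨ b ++ ['.'] <+: l) ↔ l.takeWhile (· != '.') = b) := by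
  induction l with
  | nil =>
    intro b _
    constructor
    · rintro (rfl | h)
      · simp
      · simp [List.prefix_nil] at h
    · intro h; left; simpa using h.symm
  | cons c t ih =>
    intro b hb
    by_cases hc : c = '.'
    · subst hc
      rw [List.takeWhile_cons]
      simp only [bne_self_eq_false, Bool.false_eq_true, if_false]
      constructor
      · rintro (rfl | h)
        · exact absurd List.mem_cons_self hb
        · cases b with
          | nil => rfl
          | cons b0 bt =>
            exfalso
            have h' : b0 :: (bt ++ ['.']) <+: '.' :: t := by simpa using h
            exact hb ((List.cons_prefix_cons.mp h').1 ▸ List.mem_cons_self)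
      · rintro rfl
        exact Or.inr ⟨t, rfl⟩
    · have hcb : (c != '.') = true := by simpa using hc
      rw [List.takeWhile_cons, if_pos hcb]
      cases b with
      | nil =>
        constructor
        · rintro (h | h)
          · exact absurd h (by simp)
          · have h' : ['.'] <+: c :: t := by simpa using h
            exact absurd (List.cons_prefix_cons.mp h').1.symm hc
        · intro h; exact absurd h (by simp)
      | cons b0 bt =>
        have hbt : '.' ∉ bt := fun h => hb (List.mem_cons_of_mem _ h)
        constructor
        · rintro (h | h)
          · injection h with h1 h2
            subst h1
            rw [List.cons.injEq]
            exact ⟨rfl, (ih bt hbt).mp (Or.inl h2)⟩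
          · have h' : b0 :: (bt ++ ['.']) <+: c :: t := by simpa using h
            obtain ⟨h1, h2⟩ := List.cons_prefix_cons.mp h'
            subst h1
            rw [List.cons.injEq]
            exact ⟨rfl, (ih bt hbt).mp (Or.inr h2)⟩
        · intro h
          rw [List.cons.injEq] at h
          obtain ⟨h1, h2⟩ := h
          subst h1
          rcases (ih bt hbt).mpr h2 with h3 | h3
          · left; rw [h3]
          · right
            have hp : c :: (bt ++ ['.']) <+: c :: t := List.cons_prefix_cons.mpr ⟨rfl, h3⟩
            simpa using hp

-- stripping one leading underscore then comparing with b (which does not start with '_')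
lemma pv_strip_iff (H b : List Char) (hb : b.head? ≠ some '_') :
    ((if H.head? = some '_' then H.drop 1 else H) = b) ↔ (H = b ∨ H = '_' :: b) := by
  cases H with
  | nil =>
    rw [if_neg (by simp)]
    constructor
    · exact Or.inl
    · rintro (h | h)
      · exact h
      · exact absurd h (by simp)
  | cons c t =>
    by_cases hc : c = '_'
    · subst hc
      rw [if_pos (by simp), List.drop_one, List.tail_cons]
      constructor
      · rintro rfl; exact Or.inr rfl
      · rintro (h | h)
        · exact absurd (by rw [← h]; rfl : b.head? = some '_') hb
        · simpa using h
    · rw [if_neg (by simp [hc])]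
      constructor
      · exact Or.inl
      · rintro (h | h)
        · exact h
        · exfalso; injection h with h1 _; exact hc h1

-- Chars.startswith by a single char, in head? form
lemma pv_startswith_char (H : List Char) (c : Char) :
    PySem.Chars.startswith H [c] = (H.head? == some c) := by
  rw [Bool.eq_iff_iff, PySem.Chars.startswith_iff, pv_singleton_prefix_iff, beq_iff_eq]

-- the main list-level equivalence for one banned module name
lemma pv_one_module (l b : List Char) (hdot : '.' ∉ b) (hund : b.head? ≠ some '_') :
    (((l = b ∨ l = '_' :: b) ∨ (b ++ ['.']) <+: l) ∨ ('_' :: b ++ ['.']) <+: l) ↔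
      ((if (l.takeWhile (· != '.')).head? = some '_'
          then (l.takeWhile (· != '.')).drop 1 else l.takeWhile (· != '.')) = b) := by
  have h1 := pv_comp_iff l b hdot
  have h2 := pv_comp_iff l ('_' :: b) (by simpa using hdot)
  rw [pv_strip_iff _ b hund, ← h1, ← h2]
  constructor
  · rintro (((h | h) | h) | h)
    · exact Or.inl (Or.inl h)
    · exact Or.inr (Or.inl h)
    · exact Or.inl (Or.inr h)
    · exact Or.inr (Or.inr h)
  · rintro ((h | h) | (h | h))
    · exact Or.inl (Or.inl (Or.inl h))
    · exact Or.inl (Or.inr h)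
    · exact Or.inl (Or.inl (Or.inr h))
    · exact Or.inr h

-- the whole equivalence, unconditional on the input string
lemma pv_main (module : String) : is_banned_module module = is_banned_module_alt module := by
  have hfind : PySem.Str.find module "." = PySem.Chars.find module.toList ['.'] := by
    rw [PySem.Str.find_eq, show ("." : String).toList = ['.'] from rfl]
  have hhead : (if PySem.Str.find module "." < 0 then module
      else PySem.Str.slice module none (some (PySem.Str.find module "."))).toList
      = module.toList.takeWhile (· != '.') := by
    rw [← pv_head_eq_takeWhile module.toList]
    by_cases h : PySem.Chars.find module.toList ['.'] < 0
    · rw [hfind, if_pos h, if_pos h]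
    · have hge : (0:Int) ≤ PySem.Chars.find module.toList ['.'] := by omega
      rw [hfind, if_neg h, if_neg h, PySem.Str.toList_slice, PySem.Chars.slice_eq_listSlice,
        PySem.List.slice_to _ hge]
  have hsw : PySem.Str.startswith (if PySem.Str.find module "." < 0 then module
      else PySem.Str.slice module none (some (PySem.Str.find module "."))) "_"
      = ((module.toList.takeWhile (· != '.')).head? == some '_') := by
    rw [PySem.Str.startswith_eq, hhead]
    exact pv_startswith_char _ '_'
  have hhead2 : (if PySem.Str.startswith (if PySem.Str.find module "." < 0 then module
        else PySem.Str.slice module none (some (PySem.Str.find module "."))) "_"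
      then PySem.Str.slice (if PySem.Str.find module "." < 0 then module
        else PySem.Str.slice module none (some (PySem.Str.find module "."))) (some 1) none
      else (if PySem.Str.find module "." < 0 then module
        else PySem.Str.slice module none (some (PySem.Str.find module ".")))).toList
      = (if (module.toList.takeWhile (· != '.')).head? = some '_'
         then (module.toList.takeWhile (· != '.')).drop 1
         else module.toList.takeWhile (· != '.')) := by
    rw [hsw]
    by_cases h : (module.toList.takeWhile (· != '.')).head? = some '_'
    · rw [if_pos (by simp [h]), if_pos h, PySem.Str.toList_slice, PySem.Chars.slice_eq_listSlice,
        PySem.List.slice_from _ (by norm_num : (0:Int) ≤ 1), hhead]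
      norm_num
    · rw [if_neg (by simp [h]), if_neg h, hhead]
  have hv : is_banned_module_alt module
      = (["jpype", "importlib", "builtins"] : List String).contains
        (if PySem.Str.startswith (if PySem.Str.find module "." < 0 then module
            else PySem.Str.slice module none (some (PySem.Str.find module "."))) "_"
          then PySem.Str.slice (if PySem.Str.find module "." < 0 then module
            else PySem.Str.slice module none (some (PySem.Str.find module "."))) (some 1) none
          else (if PySem.Str.find module "." < 0 then module
            else PySem.Str.slice module none (some (PySem.Str.find module ".")))) := rfl
  have hB : is_banned_module_alt module = true ↔
      ((if (module.toList.takeWhile (· != '.')).head? = some '_'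
         then (module.toList.takeWhile (· != '.')).drop 1
         else module.toList.takeWhile (· != '.')) = "jpype".toList ∨
       (if (module.toList.takeWhile (· != '.')).head? = some '_'
         then (module.toList.takeWhile (· != '.')).drop 1
         else module.toList.takeWhile (· != '.')) = "importlib".toList ∨
       (if (module.toList.takeWhile (· != '.')).head? = some '_'
         then (module.toList.takeWhile (· != '.')).drop 1
         else module.toList.takeWhile (· != '.')) = "builtins".toList) := by
    rw [hv, List.contains_iff_mem]
    simp only [List.mem_cons, List.not_mem_nil, or_false, ← String.toList_inj, hhead2]
  have hA : is_banned_module module = true ↔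
      ((((module.toList = "jpype".toList ∨ module.toList = '_' :: "jpype".toList) ∨
          ("jpype".toList ++ ['.']) <+: module.toList) ∨
          ('_' :: "jpype".toList ++ ['.']) <+: module.toList) ∨
       ((((module.toList = "importlib".toList ∨ module.toList = '_' :: "importlib".toList) ∨
          ("importlib".toList ++ ['.']) <+: module.toList) ∨
          ('_' :: "importlib".toList ++ ['.']) <+: module.toList) ∨
       (((module.toList = "builtins".toList ∨ module.toList = '_' :: "builtins".toList) ∨
          ("builtins".toList ++ ['.']) <+: module.toList) ∨
          ('_' :: "builtins".toList ++ ['.']) <+: module.toList))) := by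
    have e1 : ("_" ++ "jpype").toList = '_' :: "jpype".toList := rfl
    have e2 : ("jpype" ++ ".").toList = "jpype".toList ++ ['.'] := rfl
    have e3 : ("_" ++ "jpype" ++ ".").toList = '_' :: "jpype".toList ++ ['.'] := rfl
    have e4 : ("_" ++ "importlib").toList = '_' :: "importlib".toList := rfl
    have e5 : ("importlib" ++ ".").toList = "importlib".toList ++ ['.'] := rfl
    have e6 : ("_" ++ "importlib" ++ ".").toList = '_' :: "importlib".toList ++ ['.'] := rfl
    have e7 : ("_" ++ "builtins").toList = '_' :: "builtins".toList := rfl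
    have e8 : ("builtins" ++ ".").toList = "builtins".toList ++ ['.'] := rfl
    have e9 : ("_" ++ "builtins" ++ ".").toList = '_' :: "builtins".toList ++ ['.'] := rfl
    simp only [is_banned_module, pvLoopA, pvBannedA, pvCheckA, Bool.or_eq_true,
      beq_iff_eq, PySem.Str.startswith_eq, PySem.Chars.startswith_iff,
      ← String.toList_inj, e1, e2, e3, e4, e5, e6, e7, e8, e9,
      Bool.false_eq_true, or_false]
  rw [Bool.eq_iff_iff, hA, hB,
    ← pv_one_module module.toList "jpype".toList (by decide) (by decide),
    ← pv_one_module module.toList "importlib".toList (by decide) (by decide),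
    ← pv_one_module module.toList "builtins".toList (by decide) (by decide)]

-- ===== VERDICT (by name: the statement is the Claim_ definition above) =====
theorem is_banned_module_spec : Claim_equal_is_banned_module := by
  intro module _
  unfold Spec_is_banned_module
  exact pv_main module
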